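-- pv_equiv track=rewrite | github.com/mishlawi/ANBToolKit | Doc/ANB/anbtk/filters/filters.py | compose_header
-- ===== SOURCE A (Python) =====
-- def compose_header(initial,arguments):
--     header = "The "
--     for (elem,_) in arguments[:-1]:
--         if elem == 'unclesaunts':
--             header += "uncles and aunts of the "
--         else:
--             header += elem + " of the "
--     elem,_ = arguments[-1]
--     if elem == 'unclesaunts':
--         header += f"uncles and aunts of {initial}:"
--     else:
--         header += elem + f" of {initial}:"
--     return header
-- ===== SOURCE B (Python) =====
-- def compose_header(initial, arguments):
--     # Recursive decomposition: build the header front-to-back by structural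
--     # recursion on the arguments list, the last element closing the sentence.
--     def phrase(elem):
--         return "uncles and aunts" if elem == 'unclesaunts' else elem
--     def go(items):
--         elem, _ = items[0]
--         if len(items) == 1:
--             return phrase(elem) + f" of {initial}:"
--         return phrase(elem) + " of the " + go(items[1:])
--     return "The " + go(arguments)
-- ===== Notes on version B (the rewrite author's own statement) =====
-- stated objective: alternative
-- what changed: Replaces A's imperative accumulator loop over arguments[:-1] plus a separate last-element branch by a single structural recursion on the list with a shared phrase() helper; Pre_ excludes the empty list, on which A raises IndexError.
import Mathlib
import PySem

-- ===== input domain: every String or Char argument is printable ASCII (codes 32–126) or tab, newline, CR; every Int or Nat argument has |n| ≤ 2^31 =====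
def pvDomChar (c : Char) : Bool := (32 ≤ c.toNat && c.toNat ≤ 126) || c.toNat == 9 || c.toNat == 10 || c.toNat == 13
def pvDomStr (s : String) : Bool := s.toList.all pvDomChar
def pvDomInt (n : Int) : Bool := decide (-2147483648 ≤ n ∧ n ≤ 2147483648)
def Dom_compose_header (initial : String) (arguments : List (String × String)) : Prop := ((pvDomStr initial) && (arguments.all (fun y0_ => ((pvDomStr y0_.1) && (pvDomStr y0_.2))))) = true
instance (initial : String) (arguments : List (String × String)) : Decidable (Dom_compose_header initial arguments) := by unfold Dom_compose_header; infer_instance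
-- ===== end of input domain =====

-- B builds the header by structural recursion on the arguments list (shared phrase helper,
-- last element closes the sentence) instead of A's accumulator loop over arguments[:-1]
-- plus a separate final branch. Equivalence is claimed for nonempty arguments
-- (A raises IndexError on []).

-- ===== PORT A =====
-- accumulator loop over arguments[:-1], then the arguments[-1] branch
def compose_header (initial : String) (arguments : List (String × String)) : String :=
  let header := (PySem.List.slice arguments none (some (-1))).foldl
    (fun h p =>
      if p.1 == "unclesaunts" then h ++ "uncles and aunts of the "
      else h ++ p.1 ++ " of the ") "The "
  match PySem.List.pyGet? arguments (-1) with
  | some p =>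
    if p.1 == "unclesaunts" then header ++ "uncles and aunts of " ++ initial ++ ":"
    else header ++ p.1 ++ " of " ++ initial ++ ":"
  | none => header  -- IndexError in Python; excluded by Pre_compose_header

-- ===== PORT B =====
def chPhrase (elem : String) : String :=
  if elem == "unclesaunts" then "uncles and aunts" else elem

def chGo (initial : String) : List (String × String) → String
  | [] => ""  -- items[0] raises IndexError in Python; excluded by Pre_compose_header
  | [p] => chPhrase p.1 ++ " of " ++ initial ++ ":"
  | p :: q :: rest => chPhrase p.1 ++ " of the " ++ chGo initial (q :: rest)

def compose_header_alt (initial : String) (arguments : List (String × String)) : String :=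
  "The " ++ chGo initial arguments

-- ===== PRECONDITION & SPEC =====
-- A raises IndexError (arguments[-1]) on the empty list; nothing else is excluded.
def Pre_compose_header (initial : String) (arguments : List (String × String)) : Prop :=
  arguments ≠ []
instance (initial : String) (arguments : List (String × String)) : Decidable (Pre_compose_header initial arguments) := by unfold Pre_compose_header; infer_instance

def pvWitness_compose_header : String × (List (String × String)) :=
  ("Anna", [("parents", "x"), ("unclesaunts", "y")])

def Spec_compose_header (initial : String) (arguments : List (String × String)) (out : String) : Prop := out = compose_header_alt initial arguments
instance (initial : String) (arguments : List (String × String)) (out : String) : Decidable (Spec_compose_header initial arguments out) := by unfold Spec_compose_header; infer_instance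

-- ===== CLAIM (what is proved, stated in full; the proofs are below) =====
def Claim_equal_compose_header : Prop := ∀ (initial : String) (arguments : List (String × String)), Dom_compose_header initial arguments → Pre_compose_header initial arguments → Spec_compose_header initial arguments (compose_header initial arguments)

-- ===== LEMMAS AND PROOFS =====

-- A's loop step and final branch, named for the invariant lemma
def chStep (h : String) (p : String × String) : String :=
  if p.1 == "unclesaunts" then h ++ "uncles and aunts of the "
  else h ++ p.1 ++ " of the "

def chFinish (initial : String) (header : String) (p : String × String) : String :=
  if p.1 == "unclesaunts" then header ++ "uncles and aunts of " ++ initial ++ ":"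
  else header ++ p.1 ++ " of " ++ initial ++ ":"

lemma chStep_eq (h : String) (p : String × String) :
    chStep h p = h ++ (chPhrase p.1 ++ " of the ") := by
  simp only [chStep, chPhrase]
  split_ifs with hc
  · rw [show ("uncles and aunts" : String) ++ " of the " = "uncles and aunts of the " from by decide]
  · rw [String.append_assoc]

lemma chFinish_eq (initial h : String) (p : String × String) :
    chFinish initial h p = h ++ (chPhrase p.1 ++ " of " ++ initial ++ ":") := by
  simp only [chFinish, chPhrase]
  split_ifs with hc
  · rw [show ("uncles and aunts" : String) ++ " of " = "uncles and aunts of " from by decide]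
    simp only [String.append_assoc]
  · simp only [String.append_assoc]

lemma chGo_key (initial : String) : ∀ (xs : List (String × String)) (hne : xs ≠ []) (h : String),
    chFinish initial (xs.dropLast.foldl chStep h) (xs.getLast hne) = h ++ chGo initial xs := by
  intro xs
  induction xs with
  | nil => intro hne; exact absurd rfl hne
  | cons p rest ih =>
    intro hne h
    cases rest with
    | nil =>
      simp [List.dropLast, chGo, chFinish_eq]
    | cons q rest' =>
      have hne' : q :: rest' ≠ [] := by simp
      calc chFinish initial ((p :: q :: rest').dropLast.foldl chStep h)
              ((p :: q :: rest').getLast hne)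
          = chFinish initial (((q :: rest').dropLast).foldl chStep (chStep h p))
              ((q :: rest').getLast hne') := by
            simp [List.dropLast_cons_of_ne_nil hne', List.getLast_cons hne']
        _ = chStep h p ++ chGo initial (q :: rest') := ih hne' (chStep h p)
        _ = h ++ chGo initial (p :: q :: rest') := by
            rw [chStep_eq, chGo, String.append_assoc]

-- ===== VERDICT (by name: the statement is the Claim_ definition above) =====
theorem compose_header_spec : Claim_equal_compose_header := by
  intro initial arguments _ hpre
  unfold Spec_compose_header compose_header compose_header_alt
  rw [PySem.List.slice_to_neg_one, PySem.List.pyGet?_neg_one,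
    List.getLast?_eq_some_getLast hpre]
  exact chGo_key initial arguments hpre "The "
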